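-- pv_equiv track=rewrite | github.com/chadybo/MD5-PasswordCracker | task5.py | generate_case_combinations
-- ===== SOURCE A (Python) =====
-- def generate_case_combinations(word):
--     if len(word) == 0:
--         return [""]
--
--     first_char = word[0]
--     rest_combinations = generate_case_combinations(word[1:])
--
--     combinations = []
--
--     for combination in rest_combinations:
--
--         combinations.append(first_char.lower() + combination)
--         combinations.append(first_char.upper() + combination)
--
--     return combinations
-- ===== SOURCE B (Python) =====
-- def generate_case_combinations(word):
--     combos = [""]
--     for ch in reversed(word):
--         combos = [p + c for c in combos for p in (ch.lower(), ch.upper())]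
--     return combos
-- ===== Notes on version B (the rewrite author's own statement) =====
-- stated objective: alternative
-- what changed: Replaces the recursion on the word's tail (with an append-loop over the recursive result) by an iterative accumulation: start from [""] and fold over reversed(word), rebuilding the list with a comprehension that prefixes the lower- then upper-case character.
import Mathlib
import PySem

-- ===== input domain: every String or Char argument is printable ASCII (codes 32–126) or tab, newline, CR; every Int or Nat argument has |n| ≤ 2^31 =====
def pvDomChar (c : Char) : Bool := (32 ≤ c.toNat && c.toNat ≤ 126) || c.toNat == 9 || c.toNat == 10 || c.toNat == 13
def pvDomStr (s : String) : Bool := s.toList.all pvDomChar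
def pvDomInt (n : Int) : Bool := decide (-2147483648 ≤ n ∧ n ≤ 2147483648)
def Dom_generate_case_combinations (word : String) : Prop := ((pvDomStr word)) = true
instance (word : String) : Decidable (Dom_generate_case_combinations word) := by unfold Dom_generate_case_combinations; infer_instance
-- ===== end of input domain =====

-- B replaces A's recursion by an iterative fold over the reversed word; same values, alternative structure.
-- ===== PORT A =====
-- recursion on the character list of `word` (Python: word[0], word[1:])
def gccA : List Char → List String
  | [] => [""]
  | c :: rest =>
      (gccA rest).foldl (fun combinations combination =>
        combinations ++ [String.mk [PySem.Chars.lowerChar c] ++ combination,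
                         String.mk [PySem.Chars.upperChar c] ++ combination]) []

def generate_case_combinations (word : String) : List String := gccA word.toList

-- ===== PORT B =====
def gccStep (combos : List String) (ch : Char) : List String :=
  combos.flatMap (fun c => [String.mk [PySem.Chars.lowerChar ch] ++ c,
                            String.mk [PySem.Chars.upperChar ch] ++ c])

def generate_case_combinations_alt (word : String) : List String :=
  word.toList.reverse.foldl gccStep [""]

-- ===== PRECONDITION & SPEC =====
def Spec_generate_case_combinations (word : String) (out : List String) : Prop := out = generate_case_combinations_alt word
instance (word : String) (out : List String) : Decidable (Spec_generate_case_combinations word out) := by unfold Spec_generate_case_combinations; infer_instance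

-- ===== CLAIM (what is proved, stated in full; the proofs are below) =====
def Claim_equal_generate_case_combinations : Prop := ∀ (word : String), Dom_generate_case_combinations word → Spec_generate_case_combinations word (generate_case_combinations word)

-- ===== LEMMAS AND PROOFS =====

-- ===== VERDICT (by name: the statement is the Claim_ definition above) =====
theorem gccA_eq_foldl_reverse (l : List Char) :
    gccA l = l.reverse.foldl gccStep [""] := by
  induction l with
  | nil => rfl
  | cons c rest ih =>
      simp only [gccA, List.reverse_cons, List.foldl_append, List.foldl_cons, List.foldl_nil, ← ih]
      rw [PySem.List.foldl_append_eq_flatMap]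
      rfl

theorem generate_case_combinations_spec : Claim_equal_generate_case_combinations := by
  intro word _
  show generate_case_combinations word = generate_case_combinations_alt word
  exact gccA_eq_foldl_reverse word.toList
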